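-- pv_equiv track=rewrite | github.com/zz0320/rosbag-web-manager | A01_rosbag_extractor.py | classify_topics
-- ===== SOURCE A (Python) =====
-- def classify_topics(topics, topic_type_map):
--     """将话题分类为不同类别"""
--     topic_categories = {
--         'joint_state_topics': [],
--         'arm_joint_state_topics': [],
--         'gripper_state_topics': [],
--         'arm_control_topics': [],
--         'gripper_position_control_topics': [],
--         'compressed_image_topics': [],
--         'all_topics': []
--     }
--
--     for topic in topics:
--         # 添加到所有话题列表
--         topic_categories['all_topics'].append(topic)
--
--         # 根据话题类型和名称进行分类
--         topic_type = topic_type_map.get(topic, "")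
--
--         # 处理JointState类型话题
--         if topic_type == "sensor_msgs/JointState":
--             topic_categories['joint_state_topics'].append(topic)
--
--             # 进一步区分机械臂和夹爪的JointState话题
--             if 'arm' in topic:
--                 topic_categories['arm_joint_state_topics'].append(topic)
--             elif 'gripper' in topic:
--                 topic_categories['gripper_state_topics'].append(topic)
--
--         # 处理机械臂控制话题
--         elif topic_type == "hdas_msg/motor_control" and 'arm' in topic:
--             topic_categories['arm_control_topics'].append(topic)
--
--         # 处理夹爪位置控制话题
--         elif topic_type == "std_msgs/Float32" and 'gripper' in topic:
--             topic_categories['gripper_position_control_topics'].append(topic)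
--
--         # 处理压缩图像话题
--         elif topic_type == "sensor_msgs/CompressedImage":
--             topic_categories['compressed_image_topics'].append(topic)
--
--     return topic_categories
-- ===== SOURCE B (Python) =====
-- def classify_topics(topics, topic_type_map):
--     """Classify topics by building each category as an independent filtered pass."""
--     topics = list(topics)
--     t = lambda x: topic_type_map.get(x, "")
--     return {
--         'joint_state_topics': [x for x in topics if t(x) == "sensor_msgs/JointState"],
--         'arm_joint_state_topics': [x for x in topics if t(x) == "sensor_msgs/JointState" and 'arm' in x],
--         'gripper_state_topics': [x for x in topics if t(x) == "sensor_msgs/JointState" and 'gripper' in x and 'arm' not in x],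
--         'arm_control_topics': [x for x in topics if t(x) == "hdas_msg/motor_control" and 'arm' in x],
--         'gripper_position_control_topics': [x for x in topics if t(x) == "std_msgs/Float32" and 'gripper' in x],
--         'compressed_image_topics': [x for x in topics if t(x) == "sensor_msgs/CompressedImage"],
--         'all_topics': topics,
--     }
-- ===== Notes on version B (the rewrite author's own statement) =====
-- stated objective: simpler
-- what changed: Replaces A's single stateful loop that appends into a pre-built dict of seven accumulator lists (with a nested if/elif chain) by seven independent filtered comprehensions over the topic list, one per category; the elif exclusivity is made explicit in the gripper_state filter ('arm' not in topic).
import Mathlib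
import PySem

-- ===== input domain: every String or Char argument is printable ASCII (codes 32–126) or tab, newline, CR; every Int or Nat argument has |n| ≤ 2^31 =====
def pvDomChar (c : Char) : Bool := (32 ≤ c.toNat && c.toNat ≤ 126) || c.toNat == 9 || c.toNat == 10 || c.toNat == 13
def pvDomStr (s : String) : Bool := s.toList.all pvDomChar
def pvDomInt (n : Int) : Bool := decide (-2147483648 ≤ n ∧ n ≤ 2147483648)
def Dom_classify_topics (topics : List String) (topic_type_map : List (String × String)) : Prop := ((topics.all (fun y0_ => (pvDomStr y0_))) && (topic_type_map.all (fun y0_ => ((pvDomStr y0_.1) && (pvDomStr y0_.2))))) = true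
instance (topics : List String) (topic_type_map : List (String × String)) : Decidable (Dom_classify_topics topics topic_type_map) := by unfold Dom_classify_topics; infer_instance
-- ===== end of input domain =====

-- B replaces A's single stateful classification loop by seven independent filtering passes (objective: simpler).

-- ===== PORT A =====
-- one loop iteration of A: state is the 7 accumulator lists of the pre-built dict, in A's key order
def pvStepA (topic_type_map : List (String × String))
    (acc : List String × List String × List String × List String × List String × List String × List String)
    (topic : String) :
    List String × List String × List String × List String × List String × List String × List String :=
  match acc with
  | (js, ajs, gs, ac, gpc, ci, allt) =>
    let allt := allt ++ [topic]
    let ttype := (List.lookup topic topic_type_map).getD ""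
    if ttype == "sensor_msgs/JointState" then
      let js := js ++ [topic]
      if PySem.Str.isIn "arm" topic then
        (js, ajs ++ [topic], gs, ac, gpc, ci, allt)
      else if PySem.Str.isIn "gripper" topic then
        (js, ajs, gs ++ [topic], ac, gpc, ci, allt)
      else
        (js, ajs, gs, ac, gpc, ci, allt)
    else if ttype == "hdas_msg/motor_control" && PySem.Str.isIn "arm" topic then
      (js, ajs, gs, ac ++ [topic], gpc, ci, allt)
    else if ttype == "std_msgs/Float32" && PySem.Str.isIn "gripper" topic then
      (js, ajs, gs, ac, gpc ++ [topic], ci, allt)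
    else if ttype == "sensor_msgs/CompressedImage" then
      (js, ajs, gs, ac, gpc, ci ++ [topic], allt)
    else
      (js, ajs, gs, ac, gpc, ci, allt)

def classify_topics (topics : List String) (topic_type_map : List (String × String)) : List (String × List String) :=
  match topics.foldl (pvStepA topic_type_map) ([], [], [], [], [], [], []) with
  | (js, ajs, gs, ac, gpc, ci, allt) =>
    [("joint_state_topics", js),
     ("arm_joint_state_topics", ajs),
     ("gripper_state_topics", gs),
     ("arm_control_topics", ac),
     ("gripper_position_control_topics", gpc),
     ("compressed_image_topics", ci),
     ("all_topics", allt)]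

-- ===== PORT B =====
-- Source B's `t = lambda x: topic_type_map.get(x, "")`
def pvTypeOf (topic_type_map : List (String × String)) (x : String) : String :=
  (List.lookup x topic_type_map).getD ""

def classify_topics_alt (topics : List String) (topic_type_map : List (String × String)) : List (String × List String) :=
  [("joint_state_topics",
      topics.filter (fun x => pvTypeOf topic_type_map x == "sensor_msgs/JointState")),
   ("arm_joint_state_topics",
      topics.filter (fun x => pvTypeOf topic_type_map x == "sensor_msgs/JointState" && PySem.Str.isIn "arm" x)),
   ("gripper_state_topics",
      topics.filter (fun x => pvTypeOf topic_type_map x == "sensor_msgs/JointState" && PySem.Str.isIn "gripper" x && !PySem.Str.isIn "arm" x)),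
   ("arm_control_topics",
      topics.filter (fun x => pvTypeOf topic_type_map x == "hdas_msg/motor_control" && PySem.Str.isIn "arm" x)),
   ("gripper_position_control_topics",
      topics.filter (fun x => pvTypeOf topic_type_map x == "std_msgs/Float32" && PySem.Str.isIn "gripper" x)),
   ("compressed_image_topics",
      topics.filter (fun x => pvTypeOf topic_type_map x == "sensor_msgs/CompressedImage")),
   ("all_topics", topics)]

-- ===== PRECONDITION & SPEC =====
def Spec_classify_topics (topics : List String) (topic_type_map : List (String × String)) (out : List (String × List String)) : Prop := out = classify_topics_alt topics topic_type_map
instance (topics : List String) (topic_type_map : List (String × String)) (out : List (String × List String)) : Decidable (Spec_classify_topics topics topic_type_map out) := by unfold Spec_classify_topics; infer_instance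

-- ===== CLAIM (what is proved, stated in full; the proofs are below) =====
def Claim_equal_classify_topics : Prop := ∀ (topics : List String) (topic_type_map : List (String × String)), Dom_classify_topics topics topic_type_map → Spec_classify_topics topics topic_type_map (classify_topics topics topic_type_map)

-- ===== LEMMAS AND PROOFS =====
-- loop invariant: A's fold extends each accumulator by the corresponding filter of the remaining topics
lemma foldl_pvStepA (m : List (String × String)) (ts : List String)
    (js ajs gs ac gpc ci allt : List String) :
    ts.foldl (pvStepA m) (js, ajs, gs, ac, gpc, ci, allt) =
      (js ++ ts.filter (fun x => pvTypeOf m x == "sensor_msgs/JointState"),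
       ajs ++ ts.filter (fun x => pvTypeOf m x == "sensor_msgs/JointState" && PySem.Str.isIn "arm" x),
       gs ++ ts.filter (fun x => pvTypeOf m x == "sensor_msgs/JointState" && PySem.Str.isIn "gripper" x && !PySem.Str.isIn "arm" x),
       ac ++ ts.filter (fun x => pvTypeOf m x == "hdas_msg/motor_control" && PySem.Str.isIn "arm" x),
       gpc ++ ts.filter (fun x => pvTypeOf m x == "std_msgs/Float32" && PySem.Str.isIn "gripper" x),
       ci ++ ts.filter (fun x => pvTypeOf m x == "sensor_msgs/CompressedImage"),
       allt ++ ts) := by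
  induction ts generalizing js ajs gs ac gpc ci allt with
  | nil => simp
  | cons x ts ih =>
    simp only [List.foldl_cons, pvStepA, pvTypeOf, List.filter_cons]
    by_cases h1 : (List.lookup x m).getD "" = "sensor_msgs/JointState" <;>
    by_cases h2 : (List.lookup x m).getD "" = "hdas_msg/motor_control" <;>
    by_cases h3 : (List.lookup x m).getD "" = "std_msgs/Float32" <;>
    by_cases h4 : (List.lookup x m).getD "" = "sensor_msgs/CompressedImage" <;>
    by_cases ha : PySem.Str.isIn "arm" x <;>
    by_cases hg : PySem.Str.isIn "gripper" x <;>
    simp_all [pvTypeOf, List.append_assoc]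

-- ===== VERDICT (by name: the statement is the Claim_ definition above) =====
theorem classify_topics_spec : Claim_equal_classify_topics := by
  intro topics m _
  show classify_topics topics m = classify_topics_alt topics m
  unfold classify_topics classify_topics_alt
  rw [foldl_pvStepA]
  simp [pvTypeOf]
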